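-- pv_equiv track=rewrite | github.com/chathasphere/script-monkey | helpers.py | prepare_batches
-- ===== SOURCE A (Python) =====
-- def prepare_batches(sequences, batch_size):
--     """
--     Splits a list of sequences into batches of a fixed size. Each sequence yields an input sequence
--     and a target sequence, with the latter one time step ahead. For example, the sequence "to be or not
--     to be" gives an input sequence of "to be or not to b" and a target sequence of "o be or not to be."
--     """
--     n_sequences = len(sequences)
--     for i in range(0, n_sequences, batch_size):
--         batch = sequences[i:i+batch_size]
--         input_sequences, target_sequences = [], []
--
--         for sequence in batch:
--             input_sequences.append(sequence[:-1])
--             target_sequences.append(sequence[1:])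
--
--         yield input_sequences, target_sequences
-- ===== SOURCE B (Python) =====
-- def prepare_batches(sequences, batch_size):
--     """Consume the list batch by batch (destructuring take/drop), building each
--     batch's (input, target) pairs together and transposing them with zip."""
--     rest = sequences
--     while rest and batch_size > 0:
--         batch, rest = rest[:batch_size], rest[batch_size:]
--         pairs = [(s[:-1], s[1:]) for s in batch]
--         inputs, targets = zip(*pairs)
--         yield list(inputs), list(targets)
-- ===== Notes on version B (the rewrite author's own statement) =====
-- stated objective: alternative
-- what changed: A strides over indices range(0,n,batch_size) and fills two accumulator lists per batch with an inner loop; B consumes the list itself by repeated take/drop destructuring and builds each batch as one list of (input,target) pairs that it transposes with zip(*...).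
import Mathlib
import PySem

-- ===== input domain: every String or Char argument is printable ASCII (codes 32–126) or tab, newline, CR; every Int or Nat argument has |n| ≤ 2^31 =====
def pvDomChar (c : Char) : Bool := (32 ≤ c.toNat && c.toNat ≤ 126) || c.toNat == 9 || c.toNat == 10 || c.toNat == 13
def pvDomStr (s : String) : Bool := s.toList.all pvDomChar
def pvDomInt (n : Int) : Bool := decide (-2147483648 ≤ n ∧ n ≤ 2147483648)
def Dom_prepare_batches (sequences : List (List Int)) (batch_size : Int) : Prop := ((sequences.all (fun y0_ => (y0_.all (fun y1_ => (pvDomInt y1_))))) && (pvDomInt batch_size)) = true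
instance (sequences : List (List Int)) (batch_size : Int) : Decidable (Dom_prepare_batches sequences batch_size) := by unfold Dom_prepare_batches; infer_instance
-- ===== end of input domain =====

-- ===== PORT A =====
-- B consumes the list batch by batch via take/drop destructuring and transposes a pair list with zip,
-- instead of A's index striding with two per-batch accumulator lists; proof about the RETURN value
-- (both Pythons are generators, realised as lists).
def prepare_batches (sequences : List (List Int)) (batch_size : Int) : List (List (List Int) × List (List Int)) :=
  let n_sequences : Int := PySem.List.len sequences
  (PySem.List.pyRange 0 n_sequences batch_size).foldl (fun out i =>
    let batch := PySem.List.slice sequences (some i) (some (i + batch_size))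
    let p := batch.foldl
      (fun (p : List (List Int) × List (List Int)) sequence =>
        (p.1 ++ [PySem.List.slice sequence none (some (-1))],
         p.2 ++ [PySem.List.slice sequence (some 1) none]))
      ([], [])
    out ++ [p]) []

-- ===== PORT B =====
-- loop of Source B: 'while rest and batch_size > 0: batch, rest = rest[:batch_size], rest[batch_size:]; …'
def prepareBatchesAltLoop (rest : List (List Int)) (batch_size : Int) : List (List (List Int) × List (List Int)) :=
  if h : rest ≠ [] ∧ 0 < batch_size then
    let batch := PySem.List.slice rest none (some batch_size)
    let rest' := PySem.List.slice rest (some batch_size) none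
    -- pairs = [(s[:-1], s[1:]) for s in batch]; zip(*pairs) transposes: lists of firsts and of seconds
    let pairs := batch.map (fun s =>
      (PySem.List.slice s none (some (-1)), PySem.List.slice s (some 1) none))
    (pairs.map Prod.fst, pairs.map Prod.snd) :: prepareBatchesAltLoop rest' batch_size
  else []
termination_by rest.length
decreasing_by
  rw [PySem.List.slice_from rest (le_of_lt h.2)]
  have h1 : rest.length ≠ 0 := fun hn => h.1 (List.eq_nil_of_length_eq_zero hn)
  have h2 : batch_size.toNat ≠ 0 := by omega
  simp [List.length_drop]; omega

def prepare_batches_alt (sequences : List (List Int)) (batch_size : Int) : List (List (List Int) × List (List Int)) :=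
  prepareBatchesAltLoop sequences batch_size

-- ===== PRECONDITION & SPEC =====
-- Pre_ excludes only batch_size = 0, on which Python's range(0, n, 0) raises ValueError.
def Pre_prepare_batches (sequences : List (List Int)) (batch_size : Int) : Prop := batch_size ≠ 0
instance (sequences : List (List Int)) (batch_size : Int) : Decidable (Pre_prepare_batches sequences batch_size) := by unfold Pre_prepare_batches; infer_instance
def pvWitness_prepare_batches : List (List Int) × Int := ([[1, 2, 3], [4, 5]], 1)
def Spec_prepare_batches (sequences : List (List Int)) (batch_size : Int) (out : List (List (List Int) × List (List Int))) : Prop := out = prepare_batches_alt sequences batch_size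
instance (sequences : List (List Int)) (batch_size : Int) (out : List (List (List Int) × List (List Int))) : Decidable (Spec_prepare_batches sequences batch_size out) := by unfold Spec_prepare_batches; infer_instance

-- ===== CLAIM (what is proved, stated in full; the proofs are below) =====
def Claim_equal_prepare_batches : Prop := ∀ (sequences : List (List Int)) (batch_size : Int), Dom_prepare_batches sequences batch_size → Pre_prepare_batches sequences batch_size → Spec_prepare_batches sequences batch_size (prepare_batches sequences batch_size)

-- ===== LEMMAS AND PROOFS =====

-- the per-batch payload both programs compute, as a function of the batch
def pvBatchPair (batch : List (List Int)) : List (List Int) × List (List Int) :=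
  (batch.map (fun s => PySem.List.slice s none (some (-1))),
   batch.map (fun s => PySem.List.slice s (some 1) none))

-- A's inner per-batch loop computes pvBatchPair
theorem pv_batch_fold (batch : List (List Int)) :
    batch.foldl
      (fun (p : List (List Int) × List (List Int)) sequence =>
        (p.1 ++ [PySem.List.slice sequence none (some (-1))],
         p.2 ++ [PySem.List.slice sequence (some 1) none]))
      ([], [])
    = pvBatchPair batch := by
  rw [PySem.List.foldl_prod_mk
        (f := fun acc s => acc ++ [PySem.List.slice s none (some (-1))])
        (g := fun acc s => acc ++ [PySem.List.slice s (some 1) none])]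
  unfold pvBatchPair
  rw [Prod.mk.injEq]
  exact ⟨PySem.List.foldl_append_singleton_eq_map _ _ _,
         PySem.List.foldl_append_singleton_eq_map _ _ _⟩

-- B's transpose-of-pairs is pvBatchPair too
theorem pv_pairs_unzip (batch : List (List Int)) :
    ((batch.map (fun s => (PySem.List.slice s none (some (-1)), PySem.List.slice s (some 1) none))).map Prod.fst,
     (batch.map (fun s => (PySem.List.slice s none (some (-1)), PySem.List.slice s (some 1) none))).map Prod.snd)
    = pvBatchPair batch := by
  simp [pvBatchPair, List.map_map, Function.comp]

-- positive-step range peels its first element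
theorem pv_pyRange_pos_cons {a b s : Int} (hs : 0 < s) (hab : a < b) :
    PySem.List.pyRange a b s = a :: PySem.List.pyRange (a + s) b s := by
  rw [PySem.List.pyRange_of_pos a b hs, PySem.List.pyRange_of_pos (a + s) b hs]
  have hsplit : (b - a + s - 1) / s = (b - a - 1) / s + 1 := by
    have h1 : b - a + s - 1 = (b - a - 1) + 1 * s := by ring
    rw [h1, Int.add_mul_ediv_right _ _ (by omega : s ≠ 0)]
  have hnn : 0 ≤ (b - a - 1) / s := Int.ediv_nonneg (by omega) (by omega)
  have hcount : ((b - a + s - 1) / s).toNat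
      = (if a + s < b then ((b - (a + s) + s - 1) / s).toNat else 0) + 1 := by
    by_cases hc : a + s < b
    · simp only [if_pos hc]
      have he : b - (a + s) + s - 1 = b - a - 1 := by ring
      rw [he, hsplit]
      omega
    · simp only [if_neg hc]
      have h0 : (b - a - 1) / s = 0 := Int.ediv_eq_zero_of_lt (by omega) (by omega)
      rw [hsplit, h0]
      decide
  rw [if_pos hab, hcount, List.range_succ_eq_map]
  simp only [List.map_cons, List.map_map]
  congr 1
  · simp
  · apply List.map_congr_left
    intro k _
    simp [Function.comp]
    ring

theorem pv_pyRange_nonpos {b s : Int} (hs : 0 < s) (hb : b ≤ 0) :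
    PySem.List.pyRange 0 b s = [] := by
  rw [PySem.List.pyRange_of_pos 0 b hs, if_neg (by omega)]
  simp

-- shifting a positive-step range starting at s down to 0
theorem pv_pyRange_shift {b s : Int} (hs : 0 < s) :
    PySem.List.pyRange s b s = (PySem.List.pyRange 0 (b - s) s).map (fun i => i + s) := by
  rw [PySem.List.pyRange_of_pos s b hs, PySem.List.pyRange_of_pos 0 (b - s) hs]
  rw [List.map_map]
  congr 1
  · funext k
    simp [Function.comp]
    ring
  · congr 1
    by_cases h : s < b
    · rw [if_pos h, if_pos (by omega)]
      congr 2
      ring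
    · rw [if_neg h, if_neg (by omega)]

-- a window of xs starting past the first s elements is a window of the dropped list
theorem pv_slice_shift (xs : List (List Int)) {i s : Int} (hi : 0 ≤ i) (hs : 0 ≤ s) :
    PySem.List.slice xs (some (i + s)) (some (i + s + s))
      = PySem.List.slice (xs.drop s.toNat) (some i) (some (i + s)) := by
  rw [PySem.List.slice_toNat xs (by omega) (by omega),
      PySem.List.slice_toNat (xs.drop s.toNat) hi (by omega),
      List.drop_drop]
  congr 1
  · omega
  · congr 1
    omega

-- one-step unfoldings of B's loop
theorem pv_altLoop_cons (rest : List (List Int)) (bs : Int) (h1 : rest ≠ []) (h2 : 0 < bs) :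
    prepareBatchesAltLoop rest bs =
      (((PySem.List.slice rest none (some bs)).map (fun s =>
          (PySem.List.slice s none (some (-1)), PySem.List.slice s (some 1) none))).map Prod.fst,
       ((PySem.List.slice rest none (some bs)).map (fun s =>
          (PySem.List.slice s none (some (-1)), PySem.List.slice s (some 1) none))).map Prod.snd)
        :: prepareBatchesAltLoop (PySem.List.slice rest (some bs) none) bs := by
  rw [prepareBatchesAltLoop, dif_pos ⟨h1, h2⟩]

theorem pv_altLoop_stop (rest : List (List Int)) (bs : Int) (h : ¬ (rest ≠ [] ∧ 0 < bs)) :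
    prepareBatchesAltLoop rest bs = [] := by
  rw [prepareBatchesAltLoop, dif_neg h]

-- main bridge: A's mapped index-range form equals B's take/drop recursion, for positive batch size
theorem pv_key (s : Int) (hs : 0 < s) : ∀ (n : Nat) (xs : List (List Int)), xs.length ≤ n →
    (PySem.List.pyRange 0 (xs.length : Int) s).map
        (fun i => pvBatchPair (PySem.List.slice xs (some i) (some (i + s))))
      = prepareBatchesAltLoop xs s := by
  intro n
  induction n with
  | zero =>
    intro xs hxs
    have hnil : xs = [] := by
      cases xs with
      | nil => rfl
      | cons a l => simp at hxs
    subst hnil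
    rw [pv_altLoop_stop _ _ (by simp)]
    simp only [List.length_nil, Nat.cast_zero, pv_pyRange_nonpos hs le_rfl, List.map_nil]
  | succ n ih =>
    intro xs hxs
    by_cases hne : xs = []
    · subst hne
      rw [pv_altLoop_stop _ _ (by simp)]
      simp only [List.length_nil, Nat.cast_zero, pv_pyRange_nonpos hs le_rfl, List.map_nil]
    · rw [pv_altLoop_cons xs s hne hs, pv_pairs_unzip]
      have hlen : 0 < (xs.length : Int) := by
        have := List.length_pos_iff.mpr hne
        omega
      rw [pv_pyRange_pos_cons hs hlen, List.map_cons, zero_add,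
          pv_pyRange_shift hs, List.map_map]
      have hdlen : (xs.drop s.toNat).length < xs.length := by
        have h1 : xs.length ≠ 0 := fun hn => hne (by cases xs <;> simp_all)
        have h2 : s.toNat ≠ 0 := by omega
        rw [List.length_drop]
        omega
      -- the heads agree definitionally (xs[0:s] = xs[:s]); one tail goal remains
      congr 1
      case neg.e_tail =>
        rw [PySem.List.slice_from xs (le_of_lt hs)]
        rw [← ih (xs.drop s.toNat) (by omega)]
        have hrange : PySem.List.pyRange 0 ((xs.length : Int) - s) s
            = PySem.List.pyRange 0 (((xs.drop s.toNat).length : Int)) s := by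
          rcases (by omega : s ≤ (xs.length : Int) ∨ (xs.length : Int) < s) with h | h
          · congr 1
            simp [List.length_drop]
            omega
          · rw [pv_pyRange_nonpos hs (by omega), pv_pyRange_nonpos hs (by simp [List.length_drop]; omega)]
        rw [← hrange]
        apply List.map_congr_left
        intro i hi
        have hi0 : 0 ≤ i := ((PySem.List.mem_pyRange_iff_of_pos hs i).mp hi).1
        simp only [Function.comp]
        rw [pv_slice_shift xs hi0 (le_of_lt hs)]

-- ===== VERDICT (by name: the statement is the Claim_ definition above) =====
theorem prepare_batches_spec : Claim_equal_prepare_batches := by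
  intro sequences batch_size _ hpre
  unfold Spec_prepare_batches prepare_batches prepare_batches_alt
  simp only [PySem.List.foldl_append_singleton_eq_map, List.nil_append, pv_batch_fold]
  rcases lt_or_gt_of_ne hpre with hneg | hpos
  · -- negative batch size: range(0, n, bs) is empty (n ≥ 0) and B's loop guard fails
    rw [pv_altLoop_stop _ _ (by omega)]
    rcases Nat.eq_zero_or_pos sequences.length with h0 | hp
    · simp [PySem.List.len, PySem.List.pyRange, h0]
    · simp [PySem.List.len, PySem.List.pyRange, not_lt_of_gt hneg]
  · simpa [PySem.List.len] using pv_key batch_size hpos sequences.length sequences le_rfl
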